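-- pv_equiv track=rewrite | github.com/phuong27102000/NTRU_HRSS_KEM_SV | Draft_Nhat/Packed_in_Rq/Python/sample.py | arr_to_str_integer
-- ===== SOURCE A (Python) =====
-- def arr_to_str_integer(bit_arr):
--     str=''
--     i=len(bit_arr)-1
--     while i>=0:
--         b = format(bit_arr[i] & 0x1fff, '13b')
--         m = 0
--         b1 = ''
--         while m < len(b):
--             if b[m] == ' ':
--                 b1 = b1 + '0'
--             else:
--                 b1 = b1 + b[m]
--             m = m + 1
--         str=str+b1
--         i=i-1
--     str=int(str,2)
--     return str
-- ===== SOURCE B (Python) =====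
-- def arr_to_str_integer(bit_arr):
--     # Pack each element's low 13 bits arithmetically, bit_arr[0] in the lowest bits.
--     result = 0
--     for x in reversed(bit_arr):
--         result = result * 8192 + (x & 0x1fff)
--     return result
-- ===== Notes on version B (the rewrite author's own statement) =====
-- stated objective: simpler
-- what changed: Replaces the per-element format/space-fix string construction and final int(s,2) parse by a single arithmetic accumulator result = result*8192 + (x & 0x1fff) over the reversed list.
-- crash fix: On the empty list A raises ValueError from int('', 2); B returns 0, the packing of no elements. — e.g. on arr_to_str_integer([]): A raises ValueError, B returns 0
import Mathlib
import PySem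

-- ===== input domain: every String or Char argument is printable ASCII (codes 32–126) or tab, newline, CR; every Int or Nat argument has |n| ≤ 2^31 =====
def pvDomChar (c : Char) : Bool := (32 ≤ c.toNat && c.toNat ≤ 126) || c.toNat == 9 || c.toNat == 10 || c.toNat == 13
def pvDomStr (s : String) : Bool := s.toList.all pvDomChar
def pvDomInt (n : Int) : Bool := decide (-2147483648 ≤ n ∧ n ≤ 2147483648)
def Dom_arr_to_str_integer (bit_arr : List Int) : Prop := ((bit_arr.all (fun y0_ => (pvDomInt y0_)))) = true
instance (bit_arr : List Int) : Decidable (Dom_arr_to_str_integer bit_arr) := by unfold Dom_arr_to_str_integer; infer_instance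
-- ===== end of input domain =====

-- B replaces A's binary-string construction and int(·,2) parse by a plain arithmetic
-- accumulator (result*8192 + (x & 0x1fff) over the reversed list): simpler.


-- ===== PORT A =====
-- format(m, '13b') for m = x & 0x1fff: binary digits of m (PySem.Int.toBinChars; m is
-- nonnegative, so no sign character appears), right-aligned to width 13 with space fill.
def pvChunkRaw (x : Int) : List Char :=
  let b := PySem.Int.toBinChars (PySem.Int.band x 8191)
  List.replicate (13 - b.length) ' ' ++ b

-- inner while loop: rebuild b char by char, turning each ' ' into '0'
def pvFixSpaces (b : List Char) : List Char :=
  b.foldl (fun b1 c => b1 ++ [if c = ' ' then '0' else c]) []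

-- int(str, 2), hand-ported: exact on the strings this program builds, which consist only
-- of the digit characters '0' and '1' (no sign/space/prefix/underscore handling applies);
-- on the empty string Python raises ValueError (excluded by Pre_) and this returns 0.
def pvBinVal (s : List Char) : Int :=
  s.foldl (fun a c => a * 2 + (if c = '1' then 1 else 0)) 0

-- outer while loop: i from len-1 down to 0, appending one 13-char chunk per element
def arr_to_str_integer (bit_arr : List Int) : Int :=
  pvBinVal (bit_arr.reverse.foldl (fun s x => s ++ pvFixSpaces (pvChunkRaw x)) [])

-- ===== PORT B =====
def arr_to_str_integer_alt (bit_arr : List Int) : Int :=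
  bit_arr.reverse.foldl (fun r x => r * 8192 + PySem.Int.band x 8191) 0

-- ===== PRECONDITION & SPEC =====
-- Pre_ excludes only the empty list, on which A's int('', 2) raises ValueError.
def Pre_arr_to_str_integer (bit_arr : List Int) : Prop := bit_arr ≠ []
instance (bit_arr : List Int) : Decidable (Pre_arr_to_str_integer bit_arr) := by
  unfold Pre_arr_to_str_integer; infer_instance
def pvWitness_arr_to_str_integer : List Int := [5, 3]

-- On the empty list A raises ValueError (int('', 2)); B returns 0, the packing of no elements.
def Raises_arr_to_str_integer (bit_arr : List Int) : Prop := bit_arr = []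
instance (bit_arr : List Int) : Decidable (Raises_arr_to_str_integer bit_arr) := by
  unfold Raises_arr_to_str_integer; infer_instance
def pvRaiseWitness_arr_to_str_integer : List Int := []
def pvRaiseWitnessOut_arr_to_str_integer : Int := 0

def Spec_arr_to_str_integer (bit_arr : List Int) (out : Int) : Prop := out = arr_to_str_integer_alt bit_arr
instance (bit_arr : List Int) (out : Int) : Decidable (Spec_arr_to_str_integer bit_arr out) := by
  unfold Spec_arr_to_str_integer; infer_instance

-- ===== CLAIM (what is proved, stated in full; the proofs are below) =====
def Claim_equal_arr_to_str_integer : Prop := ∀ (bit_arr : List Int), Dom_arr_to_str_integer bit_arr → Pre_arr_to_str_integer bit_arr → Spec_arr_to_str_integer bit_arr (arr_to_str_integer bit_arr)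
def Claim_raises_arr_to_str_integer : Prop := (∀ (bit_arr : List Int), Dom_arr_to_str_integer bit_arr → Raises_arr_to_str_integer bit_arr → ¬ Pre_arr_to_str_integer bit_arr) ∧ (Dom_arr_to_str_integer (pvRaiseWitness_arr_to_str_integer) ∧ Raises_arr_to_str_integer (pvRaiseWitness_arr_to_str_integer) ∧ arr_to_str_integer_alt (pvRaiseWitness_arr_to_str_integer) = pvRaiseWitnessOut_arr_to_str_integer)

-- ===== LEMMAS AND PROOFS =====

-- the digit-accumulation step of pvBinVal, named for use in the lemmas
def pvStep (a : Int) (c : Char) : Int := a * 2 + (if c = '1' then 1 else 0)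

lemma pvBinVal_eq_foldl (s : List Char) : pvBinVal s = s.foldl pvStep 0 := rfl

-- x & 0x1fff is a 13-bit nonnegative value
lemma pvMask_bounds (x : Int) : 0 ≤ PySem.Int.band x 8191 ∧ PySem.Int.band x 8191 < 8192 := by
  simp only [PySem.Int.band]
  split_ifs with h1 h2 h3
  · have h4 : x.toNat &&& (8191:Int).toNat ≤ (8191:Int).toNat := Nat.and_le_right
    constructor
    · positivity
    · exact_mod_cast Nat.lt_succ_of_le h4
  · exact absurd (by norm_num) h2
  · have h4 : (8191:Int).toNat - ((8191:Int).toNat &&& (-x - 1).toNat) ≤ (8191:Int).toNat := Nat.sub_le _ _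
    constructor
    · positivity
    · exact_mod_cast Nat.lt_succ_of_le h4
  · exact absurd (by norm_num) h3

-- Nat.toDigitsCore only prepends to its accumulator
lemma pvCore_append (f n : Nat) (acc : List Char) :
    Nat.toDigitsCore 2 f n acc = Nat.toDigitsCore 2 f n [] ++ acc := by
  induction f generalizing n acc with
  | zero => simp [Nat.toDigitsCore]
  | succ f ih =>
      simp only [Nat.toDigitsCore]
      by_cases h : n / 2 = 0
      · simp [h]
      · simp only [h, if_false]
        rw [ih (n/2) ((n % 2).digitChar :: acc), ih (n/2) [(n % 2).digitChar]]
        simp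

-- the binary digit string of n consists of '0'/'1' and folds back to n (with carry a)
lemma pvCore_spec (f n : Nat) (h : n < f) :
    (∀ c ∈ Nat.toDigitsCore 2 f n [], c = '0' ∨ c = '1') ∧
    (∀ a : Int, List.foldl pvStep a (Nat.toDigitsCore 2 f n []) =
      a * 2 ^ (Nat.toDigitsCore 2 f n []).length + (n : Int)) := by
  induction f generalizing n with
  | zero => omega
  | succ f ih =>
      simp only [Nat.toDigitsCore]
      by_cases h2 : n / 2 = 0
      · have hn : n = 0 ∨ n = 1 := by omega
        simp only [h2, if_true]
        constructor
        · intro c hc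
          rcases hn with h | h <;> simp [h] at hc ⊢ <;> simp [hc, Nat.digitChar]
        · intro a
          rcases hn with h | h <;> simp [h, Nat.digitChar, pvStep]
      · simp only [h2, if_false]
        rw [pvCore_append]
        have hlt : n / 2 < f := by omega
        obtain ⟨ihc, ihv⟩ := ih (n/2) hlt
        constructor
        · intro c hc
          rcases List.mem_append.1 hc with h | h
          · exact ihc c h
          · simp at h
            have : n % 2 = 0 ∨ n % 2 = 1 := by omega
            rcases this with h3 | h3 <;> simp [h, h3, Nat.digitChar]
        · intro a
          rw [List.foldl_append, ihv]
          simp only [List.length_append, List.length_singleton, List.foldl_cons, List.foldl_nil, pvStep]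
          have h3 : n % 2 = 0 ∨ n % 2 = 1 := by omega
          have h4 : (↑(n / 2) : Int) * 2 + ↑(n % 2) = ↑n := by omega
          rcases h3 with h3 | h3 <;>
            simp [h3, Nat.digitChar, pow_succ] <;> ring_nf <;> omega

-- folding the '0'-padding multiplies the carry by 2^k
lemma pvFoldl_replicate_zero (k : Nat) (a : Int) :
    List.foldl pvStep a (List.replicate k '0') = a * 2 ^ k := by
  induction k generalizing a with
  | zero => simp
  | succ k ih =>
      rw [List.replicate_succ, List.foldl_cons, ih]
      simp [pvStep, pow_succ]
      ring

lemma pvFixSpaces_eq_map (b : List Char) :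
    pvFixSpaces b = b.map (fun c => if c = ' ' then '0' else c) := by
  unfold pvFixSpaces
  exact (PySem.List.foldl_append_singleton_eq_map (fun c => if c = ' ' then '0' else c) b []).trans (by simp)

-- one 13-char chunk folds to a * 2^13 + (x & 0x1fff)
lemma pvChunk_spec (x : Int) (a : Int) :
    List.foldl pvStep a (pvFixSpaces (pvChunkRaw x)) = a * 8192 + PySem.Int.band x 8191 := by
  obtain ⟨hm0, hm1⟩ := pvMask_bounds x
  set m := PySem.Int.band x 8191 with hm
  have hbin : PySem.Int.toBinChars m = Nat.toDigits 2 m.toNat := by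
    simp [PySem.Int.toBinChars, not_lt.2 hm0]
  have hnat : m.toNat < 2 ^ 13 := by omega
  obtain ⟨hc, hv⟩ := pvCore_spec (m.toNat + 1) m.toNat (Nat.lt_succ_self _)
  have hdig : Nat.toDigits 2 m.toNat = Nat.toDigitsCore 2 (m.toNat + 1) m.toNat [] := rfl
  rw [← hdig] at hc hv
  have hlen : (Nat.toDigits 2 m.toNat).length ≤ 13 :=
    Nat.toDigits_length 2 m.toNat 13 (by norm_num) hnat
  have hchunk : pvChunkRaw x =
      List.replicate (13 - (Nat.toDigits 2 m.toNat).length) ' ' ++ Nat.toDigits 2 m.toNat := by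
    simp only [pvChunkRaw, ← hm, hbin]
  rw [pvFixSpaces_eq_map, hchunk, List.map_append, List.map_replicate]
  have hmap : (Nat.toDigits 2 m.toNat).map (fun c => if c = ' ' then '0' else c)
      = Nat.toDigits 2 m.toNat := by
    conv_rhs => rw [← List.map_id (Nat.toDigits 2 m.toNat)]
    apply List.map_congr_left
    intro c hcmem
    rcases hc c hcmem with h | h <;> simp [h]
  rw [hmap]
  rw [show (if (' ':Char) = ' ' then '0' else ' ') = '0' from rfl]
  rw [List.foldl_append, pvFoldl_replicate_zero, hv]
  have hk : (2:Int) ^ (13 - (Nat.toDigits 2 m.toNat).length) * 2 ^ (Nat.toDigits 2 m.toNat).length = 8192 := by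
    rw [← pow_add]
    have h13 : 13 - (Nat.toDigits 2 m.toNat).length + (Nat.toDigits 2 m.toNat).length = 13 := by omega
    rw [h13]
    norm_num
  rw [Int.toNat_of_nonneg hm0]
  rw [mul_assoc, hk]

-- loop invariant: parsing A's accumulated string equals B's arithmetic accumulator
lemma pvPack (l : List Int) (s : List Char) :
    pvBinVal (l.foldl (fun s x => s ++ pvFixSpaces (pvChunkRaw x)) s) =
      l.foldl (fun r x => r * 8192 + PySem.Int.band x 8191) (pvBinVal s) := by
  induction l generalizing s with
  | nil => rfl
  | cons x t ih =>
      simp only [List.foldl_cons]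
      rw [ih]
      congr 1
      rw [pvBinVal_eq_foldl, pvBinVal_eq_foldl, List.foldl_append, pvChunk_spec]

-- ===== VERDICT (by name: the statement is the Claim_ definition above) =====
theorem arr_to_str_integer_spec : Claim_equal_arr_to_str_integer := by
  intro bit_arr _ _
  unfold Spec_arr_to_str_integer arr_to_str_integer arr_to_str_integer_alt
  rw [pvPack]
  rfl

@[simp]
theorem arr_to_str_integer_raises : Claim_raises_arr_to_str_integer := by
  unfold Claim_raises_arr_to_str_integer
  exact ⟨fun bit_arr _ h => by simp [Raises_arr_to_str_integer] at h; simp [Pre_arr_to_str_integer, h],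
         by decide⟩
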